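-- pv_equiv track=rewrite | github.com/roctbb/ai-game-engine | games/coins_right_down/engine.py | _reachable_cells
-- ===== SOURCE A (Python) =====
-- _WIDTH = 10
--
-- _HEIGHT = 10
--
-- _DELTAS = {
--     "right": (1, 0),
--     "down": (0, 1),
-- }
--
-- def _reachable_cells(start: tuple[int, int], walls: set[tuple[int, int]]) -> set[tuple[int, int]]:
--     if start in walls:
--         return set()
--     seen = {start}
--     queue = [start]
--     head = 0
--     while head < len(queue):
--         current = queue[head]
--         head += 1
--         for dx, dy in _DELTAS.values():
--             nxt = (current[0] + dx, current[1] + dy)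
--             if _can_enter(nxt, walls) and nxt not in seen:
--                 seen.add(nxt)
--                 queue.append(nxt)
--     return seen
--
-- def _is_inside(position: tuple[int, int]) -> bool:
--     x, y = position
--     return 0 <= x < _WIDTH and 0 <= y < _HEIGHT
--
-- def _can_enter(position: tuple[int, int], walls: set[tuple[int, int]]) -> bool:
--     return _is_inside(position) and position not in walls
-- ===== SOURCE B (Python) =====
-- def _reachable_cells(start: tuple[int, int], walls: set[tuple[int, int]]) -> set[tuple[int, int]]:
--     # Monotone DP sweep over anti-diagonals instead of a BFS queue: moves only go
--     # right/down, so a cell is reachable iff its left or upper neighbour is.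
--     if start in walls:
--         return set()
--     reach = {start}
--     for d in range(19):          # in-grid diagonals x+y run over 0..18
--         for y in range(10):
--             x = d - y
--             if 0 <= x < 10:
--                 cell = (x, y)
--                 if cell not in walls and ((x - 1, y) in reach or (x, y - 1) in reach):
--                     reach.add(cell)
--     return reach
-- ===== Notes on version B (the rewrite author's own statement) =====
-- stated objective: alternative
-- what changed: Replaces the BFS queue/visited-set frontier by a single monotone dynamic-programming sweep over the grid's anti-diagonals: since moves go only right/down, a cell is reachable iff its left or upper neighbour is, so one ordered table pass with no queue computes the same set.
import Mathlib
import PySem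

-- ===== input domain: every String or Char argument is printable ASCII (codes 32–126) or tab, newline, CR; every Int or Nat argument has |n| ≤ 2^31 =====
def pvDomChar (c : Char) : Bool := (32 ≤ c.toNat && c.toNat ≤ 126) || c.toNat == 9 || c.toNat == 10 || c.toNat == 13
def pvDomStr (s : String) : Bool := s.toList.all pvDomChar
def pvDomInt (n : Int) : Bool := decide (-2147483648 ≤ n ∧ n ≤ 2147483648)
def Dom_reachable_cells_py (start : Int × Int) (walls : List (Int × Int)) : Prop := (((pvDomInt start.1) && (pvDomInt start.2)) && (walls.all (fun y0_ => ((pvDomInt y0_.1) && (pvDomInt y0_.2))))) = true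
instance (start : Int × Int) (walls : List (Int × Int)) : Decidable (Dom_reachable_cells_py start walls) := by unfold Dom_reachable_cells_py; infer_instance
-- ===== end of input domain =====

-- B replaces A's BFS queue by a single monotone DP sweep over the anti-diagonals of the
-- 10×10 grid (moves go only right/down, so a cell is reachable iff its left or upper
-- neighbour is); objective: alternative algorithm, no queue/frontier maintained.

-- ===== PORT A =====
-- _can_enter / _is_inside with _WIDTH = _HEIGHT = 10
def pvCanEnter (pos : Int × Int) (walls : List (Int × Int)) : Bool :=
  decide (0 ≤ pos.1 ∧ pos.1 < 10 ∧ 0 ≤ pos.2 ∧ pos.2 < 10) && !(walls.contains pos)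

-- the 100 grid cells; only used for the termination measure of the BFS loop
def pvGrid : List (Int × Int) :=
  (List.range 100).map (fun k => (((k % 10 : Nat) : Int), ((k / 10 : Nat) : Int)))

-- one neighbour test of A's inner 'for dx, dy in _DELTAS.values()' body:
-- if _can_enter(nxt, walls) and nxt not in seen: seen.add(nxt); queue.append(nxt)
def pvStep (walls : List (Int × Int)) (seen todo : List (Int × Int)) (n : Int × Int) :
    List (Int × Int) × List (Int × Int) :=
  if pvCanEnter n walls && !(seen.contains n) then (PySem.Set.add seen n, todo ++ [n]) else (seen, todo)

-- termination helpers for pvBfsLoop (cited by its decreasing_by)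
lemma pvFilterMono {α : Type} (l : List α) (p q : α → Bool) (h : ∀ x, p x = true → q x = true) :
    (l.filter p).length ≤ (l.filter q).length := by
  induction l with
  | nil => simp
  | cons a t ih =>
    by_cases hp : p a = true
    · simp only [List.filter, hp, h a hp]
      simpa using ih
    · rw [Bool.not_eq_true] at hp
      simp only [List.filter, hp]
      cases hq : q a
      · exact ih
      · simp only [List.length_cons]; omega

lemma pvFilterLt {α : Type} (l : List α) (p q : α → Bool) (h : ∀ x, p x = true → q x = true)
    (a : α) (hal : a ∈ l) (hpa : p a = false) (hqa : q a = true) :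
    (l.filter p).length < (l.filter q).length := by
  induction l with
  | nil => simp at hal
  | cons b t ih =>
    rcases List.mem_cons.1 hal with rfl | hat
    · simp only [List.filter, hpa, hqa, List.length_cons]
      exact Nat.lt_succ_of_le (pvFilterMono t p q h)
    · by_cases hp : p b = true
      · simp only [List.filter, hp, h b hp, List.length_cons]
        exact Nat.succ_lt_succ (ih hat)
      · rw [Bool.not_eq_true] at hp
        simp only [List.filter, hp]
        cases hq : q b
        · exact ih hat
        · simp only [List.length_cons]
          exact Nat.lt_succ_of_lt (ih hat)

lemma pvMemGrid (c : Int × Int) (walls : List (Int × Int)) (h : pvCanEnter c walls = true) :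
    c ∈ pvGrid := by
  simp only [pvCanEnter, Bool.and_eq_true, decide_eq_true_eq] at h
  obtain ⟨⟨h1, h2, h3, h4⟩, -⟩ := h
  refine List.mem_map.2 ⟨c.1.toNat + 10 * c.2.toNat, List.mem_range.2 (by omega), ?_⟩
  obtain ⟨cx, cy⟩ := c
  simp only [Prod.mk.injEq]
  constructor <;> omega

lemma pvStepMeasure (walls : List (Int × Int)) (seen todo : List (Int × Int)) (n : Int × Int) :
    (pvGrid.filter (fun c => !((pvStep walls seen todo n).1.contains c))).length
      + (pvStep walls seen todo n).2.length
      ≤ (pvGrid.filter (fun c => !(seen.contains c))).length + todo.length := by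
  unfold pvStep
  split
  · next hcond =>
    simp only [Bool.and_eq_true, Bool.not_eq_true'] at hcond
    obtain ⟨hce, hfresh⟩ := hcond
    simp only [PySem.Set.add, PySem.Set.contains, hfresh, Bool.false_eq_true, if_false,
      List.length_append, List.length_cons, List.length_nil]
    have hlt : (pvGrid.filter (fun c => !((seen ++ [n]).contains c))).length
        < (pvGrid.filter (fun c => !(seen.contains c))).length := by
      apply pvFilterLt _ _ _ ?_ n (pvMemGrid n walls hce)
      · simp
      · simpa using hfresh
      · intro x hx
        simp only [Bool.not_eq_true'] at hx ⊢
        simp only [List.contains_eq_mem, decide_eq_false_iff_not, List.mem_append] at hx ⊢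
        exact fun hm => hx (Or.inl hm)
    omega
  · simp

def pvBfsLoop (walls : List (Int × Int)) (seen todo : List (Int × Int)) : List (Int × Int) :=
  match todo with
  | [] => seen
  | cur :: rest =>
    let st1 := pvStep walls seen rest (cur.1 + 1, cur.2)
    let st2 := pvStep walls st1.1 st1.2 (cur.1, cur.2 + 1)
    pvBfsLoop walls st2.1 st2.2
termination_by (pvGrid.filter (fun c => !(seen.contains c))).length + todo.length
decreasing_by
  have h2 := pvStepMeasure walls st1.1 st1.2 (cur.1, cur.2 + 1)
  have h1 := pvStepMeasure walls seen rest (cur.1 + 1, cur.2)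
  simp only [st1, List.length_cons] at *
  omega

def reachable_cells_py (start : Int × Int) (walls : List (Int × Int)) : List (Int × Int) :=
  if walls.contains start then [] else pvBfsLoop walls (PySem.Set.ofList [start]) [start]

-- ===== PORT B =====
-- body of Source B's inner 'for y in range(10)' loop at diagonal d
def pvSweepY (walls : List (Int × Int)) (d : Nat) (reach : List (Int × Int)) (y : Nat) :
    List (Int × Int) :=
  let x : Int := (d : Int) - (y : Int)
  if 0 ≤ x ∧ x < 10 then
    let c : Int × Int := (x, (y : Int))
    if !(walls.contains c) && (reach.contains (x - 1, (y : Int)) || reach.contains (x, (y : Int) - 1))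
    then PySem.Set.add reach c
    else reach
  else reach

-- body of Source B's outer 'for d in range(19)' loop
def pvSweepD (walls : List (Int × Int)) (reach : List (Int × Int)) (d : Nat) : List (Int × Int) :=
  (List.range 10).foldl (pvSweepY walls d) reach

def reachable_cells_py_alt (start : Int × Int) (walls : List (Int × Int)) : List (Int × Int) :=
  if walls.contains start then [] else (List.range 19).foldl (pvSweepD walls) (PySem.Set.ofList [start])

-- ===== PRECONDITION & SPEC =====
def Spec_reachable_cells_py (start : Int × Int) (walls : List (Int × Int)) (out : List (Int × Int)) : Prop := out = reachable_cells_py_alt start walls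
instance (start : Int × Int) (walls : List (Int × Int)) (out : List (Int × Int)) : Decidable (Spec_reachable_cells_py start walls out) := by unfold Spec_reachable_cells_py; infer_instance

-- ===== CLAIM (what is proved, stated in full; the proofs are below) =====
def Claim_equal_reachable_cells_py : Prop := ∀ (start : Int × Int) (walls : List (Int × Int)), Dom_reachable_cells_py start walls → Spec_reachable_cells_py start walls (reachable_cells_py start walls)

-- ===== LEMMAS AND PROOFS =====

-- strict "BFS discovery order" key: anti-diagonal, then y
def pvLt (a b : Int × Int) : Prop :=
  a.1 + a.2 < b.1 + b.2 ∨ (a.1 + a.2 = b.1 + b.2 ∧ a.2 < b.2)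

-- cells reachable from start by right/down moves into enterable cells
inductive pvReach (walls : List (Int × Int)) (start : Int × Int) : Int × Int → Prop
  | base : pvReach walls start start
  | step (p c : Int × Int) : pvReach walls start p →
      (c = (p.1 + 1, p.2) ∨ c = (p.1, p.2 + 1)) → pvCanEnter c walls = true →
      pvReach walls start c

lemma pvLt_asymm (a b : Int × Int) : pvLt a b → pvLt b a → False := by
  unfold pvLt; omega

lemma pvLt_irrefl (a : Int × Int) : ¬ pvLt a a := fun h => pvLt_asymm a a h h

-- two pvLt-sorted lists with the same members are equal
lemma pvSortedExt : ∀ (l1 l2 : List (Int × Int)), l1.Pairwise pvLt → l2.Pairwise pvLt →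
    (∀ a, a ∈ l1 ↔ a ∈ l2) → l1 = l2 := by
  intro l1
  induction l1 with
  | nil =>
    intro l2 _ _ hm
    cases l2 with
    | nil => rfl
    | cons b t => exact absurd ((hm b).2 (List.mem_cons_self)) (List.not_mem_nil)
  | cons a t ih =>
    intro l2 h1 h2 hm
    cases l2 with
    | nil => exact absurd ((hm a).1 (List.mem_cons_self)) (List.not_mem_nil)
    | cons b t2 =>
      have hab : a = b := by
        by_contra hne
        have ha : a ∈ b :: t2 := (hm a).1 List.mem_cons_self
        have hb : b ∈ a :: t := (hm b).2 List.mem_cons_self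
        rcases List.mem_cons.1 ha with h | h
        · exact hne h
        · rcases List.mem_cons.1 hb with h' | h'
          · exact hne h'.symm
          · exact pvLt_asymm a b ((List.pairwise_cons.1 h1).1 b h')
              ((List.pairwise_cons.1 h2).1 a h)
      subst hab
      have ht : ∀ x, x ∈ t ↔ x ∈ t2 := by
        intro x
        constructor
        · intro hx
          have := (hm x).1 (List.mem_cons_of_mem a hx)
          rcases List.mem_cons.1 this with rfl | h
          · exact absurd ((List.pairwise_cons.1 h1).1 x hx) (pvLt_irrefl x)
          · exact h
        · intro hx
          have := (hm x).2 (List.mem_cons_of_mem a hx)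
          rcases List.mem_cons.1 this with rfl | h
          · exact absurd ((List.pairwise_cons.1 h2).1 x hx) (pvLt_irrefl x)
          · exact h
      rw [ih t2 (List.pairwise_cons.1 h1).2 (List.pairwise_cons.1 h2).2 ht]

lemma pvCanEnter_iff (c : Int × Int) (walls : List (Int × Int)) :
    pvCanEnter c walls = true ↔
      (0 ≤ c.1 ∧ c.1 < 10 ∧ 0 ≤ c.2 ∧ c.2 < 10 ∧ walls.contains c = false) := by
  simp only [pvCanEnter, Bool.and_eq_true, decide_eq_true_eq, Bool.not_eq_true']
  tauto

-- every reachable cell other than start is enterable and lies on a strictly later diagonal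
lemma pvReach_diag (walls : List (Int × Int)) (start c : Int × Int)
    (h : pvReach walls start c) :
    c = start ∨ (pvCanEnter c walls = true ∧ start.1 + start.2 < c.1 + c.2) := by
  induction h with
  | base => exact Or.inl rfl
  | step p c hp hchild hce ih =>
    right
    refine ⟨hce, ?_⟩
    rcases ih with rfl | ⟨-, hd⟩ <;> rcases hchild with rfl | rfl <;> simp <;> try omega

-- ---------- A side: the BFS loop ----------

lemma pvStepCases (walls : List (Int × Int)) (seen todo : List (Int × Int)) (n : Int × Int) :
    (pvStep walls seen todo n = (seen, todo) ∧ (pvCanEnter n walls = false ∨ n ∈ seen)) ∨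
    (pvStep walls seen todo n = (seen ++ [n], todo ++ [n]) ∧ pvCanEnter n walls = true ∧ n ∉ seen) := by
  unfold pvStep
  by_cases h1 : pvCanEnter n walls = true
  · by_cases h2 : n ∈ seen
    · exact Or.inl ⟨by simp [h1, h2], Or.inr h2⟩
    · exact Or.inr ⟨by simp [h1, h2, PySem.Set.add, PySem.Set.contains, List.contains_eq_mem], h1, h2⟩
  · rw [Bool.not_eq_true] at h1
    exact Or.inl ⟨by simp [h1], Or.inl h1⟩

-- ordering of children of earlier-processed cells versus children of the current cell
lemma pvChildLt (p cur z n : Int × Int) (hp : pvLt p cur)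
    (hz : z = (p.1 + 1, p.2) ∨ z = (p.1, p.2 + 1))
    (hn : n = (cur.1 + 1, cur.2) ∨ n = (cur.1, cur.2 + 1)) : pvLt z n ∨ z = n := by
  obtain ⟨p1, p2⟩ := p; obtain ⟨c1, c2⟩ := cur
  rcases hz with rfl | rfl <;> rcases hn with rfl | rfl <;>
    simp only [pvLt, Prod.mk.injEq] at hp ⊢ <;> omega

lemma pvStartLt (walls : List (Int × Int)) (start cur n : Int × Int)
    (hcur : pvReach walls start cur)
    (hn : n = (cur.1 + 1, cur.2) ∨ n = (cur.1, cur.2 + 1)) : pvLt start n := by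
  obtain ⟨c1, c2⟩ := cur
  have hd : start = ((c1, c2) : Int × Int) ∨ start.1 + start.2 < c1 + c2 := by
    rcases pvReach_diag walls start (c1, c2) hcur with h | ⟨-, h⟩
    · exact Or.inl h.symm
    · exact Or.inr h
  rcases hn with rfl | rfl <;> rcases hd with rfl | hd <;>
    simp only [pvLt] <;> omega

lemma pvLt_n1_n2 (cur : Int × Int) : pvLt (cur.1 + 1, cur.2) (cur.1, cur.2 + 1) := by
  simp only [pvLt]; omega

lemma pvParentLeft (cur c : Int × Int) (h : (c.1 - 1, c.2) = cur) : c = (cur.1 + 1, cur.2) := by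
  obtain ⟨x, y⟩ := c; obtain ⟨u, v⟩ := cur
  simp only [Prod.mk.injEq] at h ⊢; omega

lemma pvParentUp (cur c : Int × Int) (h : (c.1, c.2 - 1) = cur) : c = (cur.1, cur.2 + 1) := by
  obtain ⟨x, y⟩ := c; obtain ⟨u, v⟩ := cur
  simp only [Prod.mk.injEq] at h ⊢; omega

-- closure property extended from `processed` to `processed ++ [cur]`
lemma pvClStep (walls processed seen S : List (Int × Int)) (cur : Int × Int)
    (hcl : ∀ c, pvCanEnter c walls = true →
      ((c.1 - 1, c.2) ∈ processed ∨ (c.1, c.2 - 1) ∈ processed) → c ∈ seen)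
    (hsub : ∀ c ∈ seen, c ∈ S)
    (h1 : pvCanEnter (cur.1 + 1, cur.2) walls = true → (cur.1 + 1, cur.2) ∈ S)
    (h2 : pvCanEnter (cur.1, cur.2 + 1) walls = true → (cur.1, cur.2 + 1) ∈ S) :
    ∀ c, pvCanEnter c walls = true →
      ((c.1 - 1, c.2) ∈ processed ++ [cur] ∨ (c.1, c.2 - 1) ∈ processed ++ [cur]) → c ∈ S := by
  intro c hce hpar
  rcases hpar with hp | hp <;> rcases List.mem_append.1 hp with hp' | hp'
  · exact hsub c (hcl c hce (Or.inl hp'))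
  · rw [pvParentLeft cur c (List.mem_singleton.1 hp')] at hce ⊢; exact h1 hce
  · exact hsub c (hcl c hce (Or.inr hp'))
  · rw [pvParentUp cur c (List.mem_singleton.1 hp')] at hce ⊢; exact h2 hce

-- origin property extended from `processed` to `processed ++ [cur]`
lemma pvOrigStep (start : Int × Int) (processed seen S : List (Int × Int)) (cur : Int × Int)
    (horig : ∀ z ∈ seen, z = start ∨ ∃ p ∈ processed, (z = (p.1 + 1, p.2) ∨ z = (p.1, p.2 + 1)))
    (hS : ∀ z ∈ S, z ∈ seen ∨ z = (cur.1 + 1, cur.2) ∨ z = (cur.1, cur.2 + 1)) :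
    ∀ z ∈ S, z = start ∨ ∃ p ∈ processed ++ [cur], (z = (p.1 + 1, p.2) ∨ z = (p.1, p.2 + 1)) := by
  intro z hz
  rcases hS z hz with hz' | hz' | hz'
  · rcases horig z hz' with h | ⟨p, hp, hc⟩
    · exact Or.inl h
    · exact Or.inr ⟨p, List.mem_append_left _ hp, hc⟩
  · exact Or.inr ⟨cur, List.mem_append_right _ (List.mem_singleton.2 rfl), Or.inl hz'⟩
  · exact Or.inr ⟨cur, List.mem_append_right _ (List.mem_singleton.2 rfl), Or.inr hz'⟩

lemma pvPwExtend (seen : List (Int × Int)) (m : Int × Int) (hpw : seen.Pairwise pvLt)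
    (hb : ∀ z ∈ seen, pvLt z m ∨ z = m) (hfresh : m ∉ seen) :
    (seen ++ [m]).Pairwise pvLt := by
  refine List.pairwise_append.2 ⟨hpw, List.pairwise_singleton _ _, ?_⟩
  intro a ha b hb'
  rw [List.mem_singleton] at hb'; subst hb'
  rcases hb a ha with h | rfl
  · exact h
  · exact absurd ha hfresh

lemma pvBfsMain (walls : List (Int × Int)) (start : Int × Int) :
    ∀ (n : Nat) (processed seen todo : List (Int × Int)),
    (pvGrid.filter (fun c => !(seen.contains c))).length + todo.length ≤ n →
    seen = processed ++ todo →
    seen.Pairwise pvLt →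
    (∀ c ∈ seen, pvReach walls start c) →
    (∀ c, pvCanEnter c walls = true →
      ((c.1 - 1, c.2) ∈ processed ∨ (c.1, c.2 - 1) ∈ processed) → c ∈ seen) →
    (∀ z ∈ seen, z = start ∨ ∃ p ∈ processed,
      (z = (p.1 + 1, p.2) ∨ z = (p.1, p.2 + 1))) →
    (pvBfsLoop walls seen todo).Pairwise pvLt ∧
    (∀ c ∈ pvBfsLoop walls seen todo, pvReach walls start c) ∧
    (∀ c, pvCanEnter c walls = true →
      ((c.1 - 1, c.2) ∈ pvBfsLoop walls seen todo ∨ (c.1, c.2 - 1) ∈ pvBfsLoop walls seen todo) →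
      c ∈ pvBfsLoop walls seen todo) ∧
    (∀ c ∈ seen, c ∈ pvBfsLoop walls seen todo) := by
  intro n
  induction n with
  | zero =>
    intro processed seen todo hm heq hpw hre hcl horig
    cases todo with
    | nil =>
      rw [pvBfsLoop]
      have hps : processed = seen := by simpa using heq.symm
      exact ⟨hpw, hre, fun c hce hpar => hcl c hce (by rwa [hps]), fun c hc => hc⟩
    | cons cur rest => simp at hm
  | succ n ih =>
    intro processed seen todo hm heq hpw hre hcl horig
    cases todo with
    | nil =>
      rw [pvBfsLoop]
      have hps : processed = seen := by simpa using heq.symm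
      exact ⟨hpw, hre, fun c hce hpar => hcl c hce (by rwa [hps]), fun c hc => hc⟩
    | cons cur rest =>
      have hcur : cur ∈ seen := by
        rw [heq]; exact List.mem_append_right _ List.mem_cons_self
      have hreach_cur : pvReach walls start cur := hre cur hcur
      have hpc : ∀ p ∈ processed, pvLt p cur := by
        intro p hp
        rw [heq] at hpw
        exact ((List.pairwise_append.1 hpw).2.2) p hp cur List.mem_cons_self
      have hbound : ∀ z ∈ seen, ∀ m : Int × Int,
          (m = (cur.1 + 1, cur.2) ∨ m = (cur.1, cur.2 + 1)) → pvLt z m ∨ z = m := by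
        intro z hz m hm'
        rcases horig z hz with rfl | ⟨p, hp, hchild⟩
        · exact Or.inl (pvStartLt walls z cur m hreach_cur hm')
        · exact pvChildLt p cur z m (hpc p hp) hchild hm'
      -- first neighbour (right)
      rcases pvStepCases walls seen rest (cur.1 + 1, cur.2) with
        ⟨hst1, hside1⟩ | ⟨hst1, hce1, hfresh1⟩
      · -- n1 skipped: state (seen, rest)
        -- second neighbour (down)
        rcases pvStepCases walls seen rest (cur.1, cur.2 + 1) with
          ⟨hst2, hside2⟩ | ⟨hst2, hce2, hfresh2⟩
        · -- both neighbours skipped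
          rw [pvBfsLoop]
          simp only [hst1, hst2]
          have hm2 : (pvGrid.filter (fun c => !(seen.contains c))).length + rest.length ≤ n := by
            simp only [List.length_cons] at hm; omega
          have heq2 : seen = (processed ++ [cur]) ++ rest := by rw [heq]; simp
          have hcl2 := pvClStep walls processed seen seen cur hcl (fun c hc => hc)
            (fun hce => hside1.elim (fun h => by rw [hce] at h; simp at h) id)
            (fun hce => hside2.elim (fun h => by rw [hce] at h; simp at h) id)
          have horig2 := pvOrigStep start processed seen seen cur horig (fun z hz => Or.inl hz)
          exact ih (processed ++ [cur]) seen rest hm2 heq2 hpw hre hcl2 horig2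
        · -- only the down neighbour is added
          rw [pvBfsLoop]
          simp only [hst1, hst2]
          have t2 := pvStepMeasure walls seen rest (cur.1, cur.2 + 1)
          rw [hst2] at t2
          have hm2 : (pvGrid.filter
              (fun c => !((seen ++ [(cur.1, cur.2 + 1)]).contains c))).length
              + (rest ++ [(cur.1, cur.2 + 1)]).length ≤ n := by
            simp only [List.length_cons, List.length_append, List.length_nil] at hm t2 ⊢
            omega
          have heq2 : seen ++ [(cur.1, cur.2 + 1)] =
              (processed ++ [cur]) ++ (rest ++ [(cur.1, cur.2 + 1)]) := by rw [heq]; simp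
          have hpw2 := pvPwExtend seen (cur.1, cur.2 + 1) hpw
            (fun z hz => hbound z hz _ (Or.inr rfl)) hfresh2
          have hre2 : ∀ c ∈ seen ++ [(cur.1, cur.2 + 1)], pvReach walls start c := by
            intro c hc
            rcases List.mem_append.1 hc with h | h
            · exact hre c h
            · rw [List.mem_singleton.1 h]
              exact pvReach.step cur _ hreach_cur (Or.inr rfl) hce2
          have hcl2 := pvClStep walls processed seen (seen ++ [(cur.1, cur.2 + 1)]) cur hcl
            (fun c hc => List.mem_append_left _ hc)
            (fun hce => hside1.elim (fun h => by rw [hce] at h; simp at h)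
              (fun h => List.mem_append_left _ h))
            (fun _ => List.mem_append_right _ (List.mem_singleton.2 rfl))
          have horig2 := pvOrigStep start processed seen (seen ++ [(cur.1, cur.2 + 1)]) cur horig
            (fun z hz => (List.mem_append.1 hz).elim Or.inl
              (fun h => Or.inr (Or.inr (List.mem_singleton.1 h))))
          obtain ⟨r1, r2, r3, r4⟩ := ih (processed ++ [cur]) (seen ++ [(cur.1, cur.2 + 1)])
            (rest ++ [(cur.1, cur.2 + 1)]) hm2 heq2 hpw2 hre2 hcl2 horig2
          exact ⟨r1, r2, r3, fun c hc => r4 c (List.mem_append_left _ hc)⟩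
      · -- the right neighbour is added
        have hpw1 := pvPwExtend seen (cur.1 + 1, cur.2) hpw
          (fun z hz => hbound z hz _ (Or.inl rfl)) hfresh1
        have hre1 : ∀ c ∈ seen ++ [(cur.1 + 1, cur.2)], pvReach walls start c := by
          intro c hc
          rcases List.mem_append.1 hc with h | h
          · exact hre c h
          · rw [List.mem_singleton.1 h]
            exact pvReach.step cur _ hreach_cur (Or.inl rfl) hce1
        have hbound1 : ∀ z ∈ seen ++ [(cur.1 + 1, cur.2)],
            pvLt z (cur.1, cur.2 + 1) ∨ z = (cur.1, cur.2 + 1) := by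
          intro z hz
          rcases List.mem_append.1 hz with h | h
          · exact hbound z h _ (Or.inr rfl)
          · rw [List.mem_singleton.1 h]
            exact Or.inl (pvLt_n1_n2 cur)
        rcases pvStepCases walls (seen ++ [(cur.1 + 1, cur.2)]) (rest ++ [(cur.1 + 1, cur.2)])
          (cur.1, cur.2 + 1) with ⟨hst2, hside2⟩ | ⟨hst2, hce2, hfresh2⟩
        · -- down neighbour skipped
          rw [pvBfsLoop]
          simp only [hst1, hst2]
          have t1 := pvStepMeasure walls seen rest (cur.1 + 1, cur.2)
          rw [hst1] at t1
          have hm2 : (pvGrid.filter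
              (fun c => !((seen ++ [(cur.1 + 1, cur.2)]).contains c))).length
              + (rest ++ [(cur.1 + 1, cur.2)]).length ≤ n := by
            simp only [List.length_cons, List.length_append, List.length_nil] at hm t1 ⊢
            omega
          have heq2 : seen ++ [(cur.1 + 1, cur.2)] =
              (processed ++ [cur]) ++ (rest ++ [(cur.1 + 1, cur.2)]) := by rw [heq]; simp
          have hcl2 := pvClStep walls processed seen (seen ++ [(cur.1 + 1, cur.2)]) cur hcl
            (fun c hc => List.mem_append_left _ hc)
            (fun _ => List.mem_append_right _ (List.mem_singleton.2 rfl))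
            (fun hce => hside2.elim (fun h => by rw [hce] at h; simp at h) id)
          have horig2 := pvOrigStep start processed seen (seen ++ [(cur.1 + 1, cur.2)]) cur horig
            (fun z hz => (List.mem_append.1 hz).elim Or.inl
              (fun h => Or.inr (Or.inl (List.mem_singleton.1 h))))
          obtain ⟨r1, r2, r3, r4⟩ := ih (processed ++ [cur]) (seen ++ [(cur.1 + 1, cur.2)])
            (rest ++ [(cur.1 + 1, cur.2)]) hm2 heq2 hpw1 hre1 hcl2 horig2
          exact ⟨r1, r2, r3, fun c hc => r4 c (List.mem_append_left _ hc)⟩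
        · -- both neighbours added
          rw [pvBfsLoop]
          simp only [hst1, hst2]
          have t1 := pvStepMeasure walls seen rest (cur.1 + 1, cur.2)
          rw [hst1] at t1
          have t2 := pvStepMeasure walls (seen ++ [(cur.1 + 1, cur.2)])
            (rest ++ [(cur.1 + 1, cur.2)]) (cur.1, cur.2 + 1)
          rw [hst2] at t2
          have hm2 : (pvGrid.filter
              (fun c => !((seen ++ [(cur.1 + 1, cur.2)] ++ [(cur.1, cur.2 + 1)]).contains c))).length
              + (rest ++ [(cur.1 + 1, cur.2)] ++ [(cur.1, cur.2 + 1)]).length ≤ n := by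
            simp only [List.length_cons, List.length_append, List.length_nil] at hm t1 t2 ⊢
            omega
          have heq2 : seen ++ [(cur.1 + 1, cur.2)] ++ [(cur.1, cur.2 + 1)] =
              (processed ++ [cur]) ++ (rest ++ [(cur.1 + 1, cur.2)] ++ [(cur.1, cur.2 + 1)]) := by
            rw [heq]; simp
          have hpw2 := pvPwExtend (seen ++ [(cur.1 + 1, cur.2)]) (cur.1, cur.2 + 1) hpw1
            hbound1 hfresh2
          have hre2 : ∀ c ∈ seen ++ [(cur.1 + 1, cur.2)] ++ [(cur.1, cur.2 + 1)],
              pvReach walls start c := by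
            intro c hc
            rcases List.mem_append.1 hc with h | h
            · exact hre1 c h
            · rw [List.mem_singleton.1 h]
              exact pvReach.step cur _ hreach_cur (Or.inr rfl) hce2
          have hcl2 := pvClStep walls processed seen
            (seen ++ [(cur.1 + 1, cur.2)] ++ [(cur.1, cur.2 + 1)]) cur hcl
            (fun c hc => List.mem_append_left _ (List.mem_append_left _ hc))
            (fun _ => List.mem_append_left _ (List.mem_append_right _ (List.mem_singleton.2 rfl)))
            (fun _ => List.mem_append_right _ (List.mem_singleton.2 rfl))
          have horig2 := pvOrigStep start processed seen
            (seen ++ [(cur.1 + 1, cur.2)] ++ [(cur.1, cur.2 + 1)]) cur horig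
            (fun z hz => by
              rcases List.mem_append.1 hz with h | h
              · rcases List.mem_append.1 h with h' | h'
                · exact Or.inl h'
                · exact Or.inr (Or.inl (List.mem_singleton.1 h'))
              · exact Or.inr (Or.inr (List.mem_singleton.1 h)))
          obtain ⟨r1, r2, r3, r4⟩ := ih (processed ++ [cur])
            (seen ++ [(cur.1 + 1, cur.2)] ++ [(cur.1, cur.2 + 1)])
            (rest ++ [(cur.1 + 1, cur.2)] ++ [(cur.1, cur.2 + 1)]) hm2 heq2 hpw2 hre2 hcl2 horig2
          exact ⟨r1, r2, r3,
            fun c hc => r4 c (List.mem_append_left _ (List.mem_append_left _ hc))⟩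


lemma pvReach_inv (walls : List (Int × Int)) (start c : Int × Int)
    (h : pvReach walls start c) (hne : c ≠ start) :
    ∃ p, pvReach walls start p ∧ (c = (p.1 + 1, p.2) ∨ c = (p.1, p.2 + 1)) ∧
      pvCanEnter c walls = true := by
  cases h with
  | base => exact absurd rfl hne
  | step p c hp hch hce => exact ⟨p, hp, hch, hce⟩

lemma pvAChar (start : Int × Int) (walls : List (Int × Int))
    (hs : walls.contains start = false) :
    (reachable_cells_py start walls).Pairwise pvLt ∧
    (∀ c, c ∈ reachable_cells_py start walls ↔ pvReach walls start c) := by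
  have hof : PySem.Set.ofList [start] = [start] := rfl
  have hA : reachable_cells_py start walls = pvBfsLoop walls [start] [start] := by
    rw [reachable_cells_py, hof, if_neg (by simpa using hs)]
  obtain ⟨r1, r2, r3, r4⟩ := pvBfsMain walls start
    ((pvGrid.filter (fun c => !(([start] : List (Int × Int)).contains c))).length + 1)
    [] [start] [start] (by simp) rfl (List.pairwise_singleton _ _)
    (fun c hc => by rw [List.mem_singleton.1 hc]; exact pvReach.base)
    (fun c _ hpar => by rcases hpar with h | h <;> simp at h)
    (fun z hz => Or.inl (List.mem_singleton.1 hz))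
  rw [hA]
  refine ⟨r1, fun c => ⟨r2 c, fun h => ?_⟩⟩
  induction h with
  | base => exact r4 start (List.mem_singleton.2 rfl)
  | step p c hp hch hce ihc =>
    refine r3 c hce ?_
    rcases hch with rfl | rfl
    · left
      rw [show (((p.1 + 1 : Int), p.2).1 - 1, ((p.1 + 1, p.2) : Int × Int).2) = p from by
        obtain ⟨p1, p2⟩ := p; simp]
      exact ihc
    · right
      rw [show ((((p.1 : Int), p.2 + 1).1, ((p.1, p.2 + 1) : Int × Int).2 - 1)) = p from by
        obtain ⟨p1, p2⟩ := p; simp]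
      exact ihc

-- ---------- B side: the diagonal sweep ----------

-- membership characterisation of the sweep state after diagonals < d and, on
-- diagonal d, the cells with y-coordinate < e
def pvChar (walls : List (Int × Int)) (start : Int × Int) (d e : Int) (c : Int × Int) : Prop :=
  c = start ∨ (pvReach walls start c ∧ c ≠ start ∧
    (c.1 + c.2 < d ∨ (c.1 + c.2 = d ∧ c.2 < e)))

lemma pvReachBounds (walls : List (Int × Int)) (start c : Int × Int)
    (h : pvReach walls start c) (hne : c ≠ start) :
    0 ≤ c.1 ∧ c.1 < 10 ∧ 0 ≤ c.2 ∧ c.2 < 10 ∧ walls.contains c = false ∧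
      start.1 + start.2 < c.1 + c.2 := by
  rcases pvReach_diag walls start c h with rfl | ⟨hce, hd⟩
  · exact absurd rfl hne
  · rw [pvCanEnter_iff] at hce
    exact ⟨hce.1, hce.2.1, hce.2.2.1, hce.2.2.2.1, hce.2.2.2.2, hd⟩

lemma pvSweepYChar (walls : List (Int × Int)) (start : Int × Int) (d k : Nat) (hk : k < 10)
    (R : List (Int × Int)) (hpw : R.Pairwise pvLt)
    (hmem : ∀ c, c ∈ R ↔ pvChar walls start (d : Int) (k : Int) c) :
    (pvSweepY walls d R k).Pairwise pvLt ∧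
    (∀ c, c ∈ pvSweepY walls d R k ↔ pvChar walls start (d : Int) ((k : Int) + 1) c) := by
  have hmemc : ∀ p : Int × Int, R.contains p = true ↔ p ∈ R := by
    intro p; rw [List.contains_eq_mem, decide_eq_true_eq]
  by_cases hx : (0 : Int) ≤ (d : Int) - (k : Int) ∧ (d : Int) - (k : Int) < 10
  · -- the cell c0 = (d - k, k) is inside the row bounds
    have hunf : pvSweepY walls d R k =
        (if !(walls.contains ((d : Int) - (k : Int), (k : Int))) &&
            (R.contains ((d : Int) - (k : Int) - 1, (k : Int)) ||
             R.contains ((d : Int) - (k : Int), (k : Int) - 1))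
         then PySem.Set.add R ((d : Int) - (k : Int), (k : Int)) else R) := by
      simp only [pvSweepY]
      rw [if_pos hx]
    have hcond : (!(walls.contains ((d : Int) - (k : Int), (k : Int))) &&
          (R.contains ((d : Int) - (k : Int) - 1, (k : Int)) ||
           R.contains ((d : Int) - (k : Int), (k : Int) - 1))) = true ↔
        (pvReach walls start ((d : Int) - (k : Int), (k : Int)) ∧
         ((d : Int) - (k : Int), (k : Int)) ≠ start) := by
      constructor
      · intro h
        simp only [Bool.and_eq_true, Bool.or_eq_true, Bool.not_eq_true'] at h
        obtain ⟨hw, hpar⟩ := h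
        have hce : pvCanEnter ((d : Int) - (k : Int), (k : Int)) walls = true := by
          rw [pvCanEnter_iff]
          exact ⟨hx.1, hx.2, by omega, by omega, hw⟩
        have key : ∀ p : Int × Int, p ∈ R →
            (((d : Int) - (k : Int), (k : Int)) = (p.1 + 1, p.2) ∨
             ((d : Int) - (k : Int), (k : Int)) = (p.1, p.2 + 1)) →
            p.1 + p.2 = (d : Int) - 1 →
            pvReach walls start ((d : Int) - (k : Int), (k : Int)) ∧
            ((d : Int) - (k : Int), (k : Int)) ≠ start := by
          intro p hpR hch hpd
          have hre_p : pvReach walls start p := by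
            rcases (hmem p).1 hpR with rfl | ⟨h', _, _⟩
            · exact pvReach.base
            · exact h'
          refine ⟨pvReach.step p _ hre_p hch hce, ?_⟩
          intro heq
          have hnep : p ≠ start := by
            intro hps
            rw [hps, ← heq] at hpd
            simp only at hpd
            omega
          have := (pvReachBounds walls start p hre_p hnep).2.2.2.2.2
          rw [← heq] at this
          omega
        rcases hpar with hp | hp
        · refine key _ ((hmemc _).1 hp) (Or.inl ?_)
            (by show (↑d - ↑k - 1 : Int) + ↑k = ↑d - 1; omega)
          show ((d : Int) - (k : Int), (k : Int)) = ((d : Int) - (k : Int) - 1 + 1, (k : Int))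
          have h' : (d : Int) - (k : Int) = (d : Int) - (k : Int) - 1 + 1 := by omega
          rw [← h']
        · refine key _ ((hmemc _).1 hp) (Or.inr ?_)
            (by show (↑d - ↑k : Int) + (↑k - 1) = ↑d - 1; omega)
          show ((d : Int) - (k : Int), (k : Int)) = ((d : Int) - (k : Int), (k : Int) - 1 + 1)
          have h' : (k : Int) = (k : Int) - 1 + 1 := by omega
          rw [← h']
      · rintro ⟨h, hne⟩
        obtain ⟨p, hp, hch, hce⟩ := pvReach_inv walls start _ h hne
        rw [pvCanEnter_iff] at hce
        simp only [Bool.and_eq_true, Bool.or_eq_true, Bool.not_eq_true']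
        refine ⟨hce.2.2.2.2, ?_⟩
        have hpmem : p ∈ R := by
          rw [hmem]
          by_cases hps : p = start
          · exact Or.inl hps
          · refine Or.inr ⟨hp, hps, Or.inl ?_⟩
            rcases hch with heq | heq <;>
              (obtain ⟨p1, p2⟩ := p; simp only [Prod.mk.injEq] at heq; omega)
        rcases hch with heq | heq
        · left
          rw [hmemc]
          rw [show ((d : Int) - (k : Int) - 1, (k : Int)) = p from by
            obtain ⟨p1, p2⟩ := p; simp only [Prod.mk.injEq] at heq ⊢; omega]
          exact hpmem
        · right
          rw [hmemc]
          rw [show ((d : Int) - (k : Int), (k : Int) - 1) = p from by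
            obtain ⟨p1, p2⟩ := p; simp only [Prod.mk.injEq] at heq ⊢; omega]
          exact hpmem
    by_cases hb : (!(walls.contains ((d : Int) - (k : Int), (k : Int))) &&
          (R.contains ((d : Int) - (k : Int) - 1, (k : Int)) ||
           R.contains ((d : Int) - (k : Int), (k : Int) - 1))) = true
    · -- the cell is marked
      obtain ⟨hr0, hne0⟩ := hcond.1 hb
      have hfresh : ((d : Int) - (k : Int), (k : Int)) ∉ R := by
        intro hin
        rcases (hmem _).1 hin with h | ⟨-, -, h⟩
        · exact hne0 h
        · simp only at h; omega
      have hadd : pvSweepY walls d R k = R ++ [((d : Int) - (k : Int), (k : Int))] := by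
        rw [hunf, if_pos hb]
        simp [PySem.Set.add, PySem.Set.contains, List.contains_eq_mem, hfresh]
      have hbound : ∀ z ∈ R, pvLt z ((d : Int) - (k : Int), (k : Int)) := by
        intro z hz
        rcases (hmem z).1 hz with hzs | ⟨-, -, h⟩
        · rw [hzs]
          have hstart := (pvReachBounds walls start _ hr0 hne0).2.2.2.2.2
          exact Or.inl (by simp only at hstart ⊢; omega)
        · simp only [pvLt] at h ⊢
          omega
      constructor
      · rw [hadd]
        exact pvPwExtend R _ hpw (fun z hz => Or.inl (hbound z hz)) hfresh
      · intro c
        rw [hadd, List.mem_append, List.mem_singleton, hmem]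
        unfold pvChar
        constructor
        · rintro ((h | ⟨h1, h2, h3⟩) | rfl)
          · exact Or.inl h
          · exact Or.inr ⟨h1, h2, by omega⟩
          · exact Or.inr ⟨hr0, hne0, by simp only; omega⟩
        · rintro (h | ⟨h1, h2, h3⟩)
          · exact Or.inl (Or.inl h)
          · by_cases hcc : c.1 + c.2 < (d : Int) ∨ (c.1 + c.2 = (d : Int) ∧ c.2 < (k : Int))
            · exact Or.inl (Or.inr ⟨h1, h2, hcc⟩)
            · right
              have hb2 := pvReachBounds walls start c h1 h2
              obtain ⟨c1, c2⟩ := c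
              simp only [Prod.mk.injEq] at *
              omega
    · -- the cell is not marked
      rw [Bool.not_eq_true] at hb
      have hnone : ¬ (pvReach walls start ((d : Int) - (k : Int), (k : Int)) ∧
          ((d : Int) - (k : Int), (k : Int)) ≠ start) := by
        intro hh
        rw [← hcond] at hh
        rw [hb] at hh
        exact Bool.false_ne_true hh
      have hkeep : pvSweepY walls d R k = R := by rw [hunf, hb]; simp
      rw [hkeep]
      refine ⟨hpw, fun c => (hmem c).trans ?_⟩
      unfold pvChar
      constructor
      · rintro (h | ⟨h1, h2, h3⟩)
        · exact Or.inl h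
        · exact Or.inr ⟨h1, h2, by omega⟩
      · rintro (h | ⟨h1, h2, h3⟩)
        · exact Or.inl h
        · by_cases hcc : c.1 + c.2 < (d : Int) ∨ (c.1 + c.2 = (d : Int) ∧ c.2 < (k : Int))
          · exact Or.inr ⟨h1, h2, hcc⟩
          · exfalso
            have hb2 := pvReachBounds walls start c h1 h2
            have hceq : c = ((d : Int) - (k : Int), (k : Int)) := by
              obtain ⟨c1, c2⟩ := c
              simp only [Prod.mk.injEq] at *
              constructor <;> omega
            rw [hceq] at h1 h2
            exact hnone ⟨h1, h2⟩
  · -- row bound fails: nothing can be on diagonal d with y = k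
    have hkeep : pvSweepY walls d R k = R := by rw [pvSweepY]; simp only [hx, if_false]
    rw [hkeep]
    refine ⟨hpw, fun c => (hmem c).trans ?_⟩
    unfold pvChar
    constructor
    · rintro (h | ⟨h1, h2, h3⟩)
      · exact Or.inl h
      · exact Or.inr ⟨h1, h2, by omega⟩
    · rintro (h | ⟨h1, h2, h3⟩)
      · exact Or.inl h
      · by_cases hcc : c.1 + c.2 < (d : Int) ∨ (c.1 + c.2 = (d : Int) ∧ c.2 < (k : Int))
        · exact Or.inr ⟨h1, h2, hcc⟩
        · exfalso
          have hb2 := pvReachBounds walls start c h1 h2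
          obtain ⟨c1, c2⟩ := c
          simp only at *
          omega

lemma pvFoldYChar (walls : List (Int × Int)) (start : Int × Int) (d : Nat) :
    ∀ (k : Nat), k ≤ 10 → ∀ R : List (Int × Int), R.Pairwise pvLt →
    (∀ c, c ∈ R ↔ pvChar walls start (d : Int) 0 c) →
    ((List.range k).foldl (pvSweepY walls d) R).Pairwise pvLt ∧
    (∀ c, c ∈ (List.range k).foldl (pvSweepY walls d) R ↔
      pvChar walls start (d : Int) (k : Int) c) := by
  intro k
  induction k with
  | zero =>
    intro _ R hpw hmem
    rw [List.range_zero, List.foldl_nil]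
    refine ⟨hpw, fun c => (hmem c).trans ?_⟩
    norm_num
  | succ k ih =>
    intro hk R hpw hmem
    obtain ⟨h1, h2⟩ := ih (by omega) R hpw hmem
    rw [List.range_succ, List.foldl_append, List.foldl_cons, List.foldl_nil]
    have := pvSweepYChar walls start d k (by omega) _ h1 h2
    rwa [show ((k : Int) + 1) = ((k + 1 : Nat) : Int) from by push_cast; ring] at this

lemma pvFoldDChar (walls : List (Int × Int)) (start : Int × Int) :
    ∀ (D : Nat), D ≤ 19 →
    ((List.range D).foldl (pvSweepD walls) [start]).Pairwise pvLt ∧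
    (∀ c, c ∈ (List.range D).foldl (pvSweepD walls) [start] ↔
      pvChar walls start (D : Int) 0 c) := by
  intro D
  induction D with
  | zero =>
    intro _
    rw [List.range_zero, List.foldl_nil]
    refine ⟨List.pairwise_singleton _ _, fun c => ?_⟩
    rw [List.mem_singleton]
    unfold pvChar
    constructor
    · exact fun h => Or.inl h
    · rintro (h | ⟨h1, h2, h3⟩)
      · exact h
      · exfalso
        have hb2 := pvReachBounds walls start c h1 h2
        obtain ⟨c1, c2⟩ := c
        simp only at *
        push_cast at h3
        omega
  | succ D ih =>
    intro hD
    obtain ⟨h1, h2⟩ := ih (by omega)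
    rw [List.range_succ, List.foldl_append, List.foldl_cons, List.foldl_nil]
    have hstep := pvFoldYChar walls start D 10 (by omega) _ h1 h2
    rw [pvSweepD]
    refine ⟨hstep.1, fun c => (hstep.2 c).trans ?_⟩
    unfold pvChar
    constructor
    · rintro (h | ⟨h1', h2', h3⟩)
      · exact Or.inl h
      · exact Or.inr ⟨h1', h2', Or.inl (by push_cast; omega)⟩
    · rintro (h | ⟨h1', h2', h3⟩)
      · exact Or.inl h
      · have hb2 := pvReachBounds walls start c h1' h2'
        refine Or.inr ⟨h1', h2', ?_⟩
        obtain ⟨c1, c2⟩ := c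
        simp only at *
        push_cast at h3 ⊢
        omega

lemma pvBChar (start : Int × Int) (walls : List (Int × Int))
    (hs : walls.contains start = false) :
    (reachable_cells_py_alt start walls).Pairwise pvLt ∧
    (∀ c, c ∈ reachable_cells_py_alt start walls ↔ pvReach walls start c) := by
  have hof : PySem.Set.ofList [start] = [start] := rfl
  have hB : reachable_cells_py_alt start walls =
      (List.range 19).foldl (pvSweepD walls) [start] := by
    rw [reachable_cells_py_alt, hof, if_neg (by simpa using hs)]
  obtain ⟨h1, h2⟩ := pvFoldDChar walls start 19 (le_refl _)
  rw [hB]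
  refine ⟨h1, fun c => (h2 c).trans ?_⟩
  unfold pvChar
  constructor
  · rintro (rfl | ⟨h, -, -⟩)
    · exact pvReach.base
    · exact h
  · intro h
    by_cases hc : c = start
    · exact Or.inl hc
    · have hb2 := pvReachBounds walls start c h hc
      exact Or.inr ⟨h, hc, Or.inl (by push_cast; omega)⟩

-- ===== VERDICT (by name: the statement is the Claim_ definition above) =====
theorem reachable_cells_py_spec : Claim_equal_reachable_cells_py := by
  intro start walls _
  unfold Spec_reachable_cells_py
  by_cases hs : walls.contains start = true
  · rw [List.contains_eq_mem, decide_eq_true_eq] at hs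
    simp [reachable_cells_py, reachable_cells_py_alt, hs]
  · rw [Bool.not_eq_true] at hs
    obtain ⟨hA1, hA2⟩ := pvAChar start walls hs
    obtain ⟨hB1, hB2⟩ := pvBChar start walls hs
    exact pvSortedExt _ _ hA1 hB1 (fun a => (hA2 a).trans (hB2 a).symm)
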